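-- pv_equiv track=rewrite | github.com/krnets/codewars-practice | 6kyu/Fill in the gaps in my timesheet/kata.py | fill_gaps
-- ===== SOURCE A (Python) =====
-- def fill_gaps(timesheet):
--     out = timesheet[:]
--     prev = None
--     for i, v in enumerate(out):
--         if v is not None:
--             if v == prev:
--                 out[gap_start:i] = [v] * (i - gap_start)
--             gap_start = i + 1
--             prev = v
--     return out
-- ===== SOURCE B (Python) =====
-- def fill_gaps(timesheet):
--     # Anchor-pair decomposition: list the non-None entries with their indices,
--     # then fill the span between each pair of consecutive equal anchors.
--     anchors = [(i, v) for i, v in enumerate(timesheet) if v is not None]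
--     out = list(timesheet)
--     for (i, u), (j, w) in zip(anchors, anchors[1:]):
--         if u == w:
--             out[i + 1:j] = [u] * (j - i - 1)
--     return out
-- ===== Notes on version B (the rewrite author's own statement) =====
-- stated objective: alternative
-- what changed: Replaces A's single running-marker scan (prev value + gap_start carried through one mutating enumerate loop) with an index-first decomposition: collect the (index, value) anchors of non-None entries once, then fill between each consecutive pair of equal anchors.
import Mathlib
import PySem

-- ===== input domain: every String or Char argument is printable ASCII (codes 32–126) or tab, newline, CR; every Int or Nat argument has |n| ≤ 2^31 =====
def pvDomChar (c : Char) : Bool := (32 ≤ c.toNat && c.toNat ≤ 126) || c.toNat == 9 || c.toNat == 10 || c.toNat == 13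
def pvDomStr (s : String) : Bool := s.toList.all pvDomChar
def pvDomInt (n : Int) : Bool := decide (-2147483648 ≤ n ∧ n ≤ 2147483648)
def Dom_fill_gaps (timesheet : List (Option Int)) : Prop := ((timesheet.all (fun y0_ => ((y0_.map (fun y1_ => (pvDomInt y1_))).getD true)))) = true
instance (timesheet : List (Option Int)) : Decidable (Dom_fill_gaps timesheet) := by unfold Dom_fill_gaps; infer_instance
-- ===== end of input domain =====

-- B replaces A's running (prev, gap_start) marker scan by an anchor-pair pass
-- (collect non-None (index,value) pairs once, fill between consecutive equal anchors);
-- alternative decomposition, same cost. A mutates its local copy only; return values are compared.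

-- ===== PORT A =====
-- State: (out, prev, gap_start). Python's gap_start is unassigned before the first
-- non-None entry but is also never read before then (prev is still None there),
-- so initialising it to 0 is behaviour-preserving.
-- out[gap_start:i] = [v]*(i-gap_start) is the same-length slice assignment:
-- out = out[:gap_start] ++ [v]*(i-gap_start) ++ out[i:].
-- The loop's slice assignments only touch indices < i, so iterating over the
-- enumeration of the initial copy is exact.
def fillGapsStepA (st : List (Option Int) × Option Int × Int) (p : Int × Option Int) :
    List (Option Int) × Option Int × Int :=
  match p.2 with
  | none => st
  | some v =>
      let out := if (some v : Option Int) = st.2.1 then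
          st.1.take st.2.2.toNat ++ List.replicate (p.1 - st.2.2).toNat (some v) ++ st.1.drop p.1.toNat
        else st.1
      (out, some v, p.1 + 1)

def fill_gaps (timesheet : List (Option Int)) : List (Option Int) :=
  ((PySem.List.enumerate timesheet 0).foldl fillGapsStepA (timesheet, none, 0)).1

-- ===== PORT B =====
-- fill for the pair ((i,u),(j,w)): out[i+1:j] = [u]*(j-i-1) when u == w
def fillGapsStepB (out : List (Option Int)) (q : (Int × Option Int) × (Int × Option Int)) :
    List (Option Int) :=
  if q.1.2 = q.2.2 then
    out.take (q.1.1 + 1).toNat ++ List.replicate (q.2.1 - q.1.1 - 1).toNat q.1.2 ++ out.drop q.2.1.toNat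
  else out

def fill_gaps_alt (timesheet : List (Option Int)) : List (Option Int) :=
  let anchors := (PySem.List.enumerate timesheet 0).filter (fun p => p.2.isSome)
  (anchors.zip anchors.tail).foldl fillGapsStepB timesheet

-- ===== PRECONDITION & SPEC =====
def Spec_fill_gaps (timesheet : List (Option Int)) (out : List (Option Int)) : Prop := out = fill_gaps_alt timesheet
instance (timesheet : List (Option Int)) (out : List (Option Int)) : Decidable (Spec_fill_gaps timesheet out) := by unfold Spec_fill_gaps; infer_instance

-- ===== CLAIM (what is proved, stated in full; the proofs are below) =====
def Claim_equal_fill_gaps : Prop := ∀ (timesheet : List (Option Int)), Dom_fill_gaps timesheet → Spec_fill_gaps timesheet (fill_gaps timesheet)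

-- ===== LEMMAS AND PROOFS =====

-- A's step is the identity on None entries, so its fold over the enumeration
-- equals its fold over the non-None anchors only.
lemma foldl_stepA_filter (l : List (Int × Option Int)) (st : List (Option Int) × Option Int × Int) :
    l.foldl fillGapsStepA st = (l.filter (fun p => p.2.isSome)).foldl fillGapsStepA st := by
  induction l generalizing st with
  | nil => rfl
  | cons p l ih =>
      cases hp : p.2 with
      | none =>
          simp only [List.filter_cons, hp, List.foldl_cons]
          have : fillGapsStepA st p = st := by
            simp [fillGapsStepA, hp]
          simp [this, ih]
      | some v =>
          simp only [List.filter_cons, hp, List.foldl_cons, Option.isSome_some]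
          exact ih _

-- Core correspondence: after the first anchor (i, some x) has set A's state,
-- A's fold over the remaining anchors equals B's fold over consecutive pairs.
lemma foldl_stepA_eq_stepB (rest : List (Int × Option Int))
    (h : ∀ p ∈ rest, p.2.isSome) :
    ∀ (out : List (Option Int)) (i x : Int),
      (rest.foldl fillGapsStepA (out, some x, i + 1)).1 =
        (((i, some x) :: rest).zip rest).foldl fillGapsStepB out := by
  induction rest with
  | nil => intro out i x; rfl
  | cons b rest ih =>
      intro out i x
      obtain ⟨w, hw⟩ := Option.isSome_iff_exists.mp (h b (by simp))
      have hrest : ∀ p ∈ rest, p.2.isSome := fun p hp => h p (by simp [hp])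
      simp only [List.zip_cons_cons, List.foldl_cons]
      have hb : b = (b.1, some w) := by rw [← hw]
      rw [hb]
      by_cases hxw : x = w
      · subst hxw
        have hA : fillGapsStepA (out, some x, i + 1) (b.1, some x) =
            (out.take (i+1).toNat ++ List.replicate (b.1 - (i+1)).toNat (some x) ++ out.drop b.1.toNat,
             some x, b.1 + 1) := by
          simp [fillGapsStepA]
        have hB : fillGapsStepB out ((i, some x), (b.1, some x)) =
            out.take (i+1).toNat ++ List.replicate (b.1 - i - 1).toNat (some x) ++ out.drop b.1.toNat := by
          simp [fillGapsStepB]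
        have harith : b.1 - (i + 1) = b.1 - i - 1 := by ring
        rw [hA, hB, harith, ih hrest]
      · have hA : fillGapsStepA (out, some x, i + 1) (b.1, some w) = (out, some w, b.1 + 1) := by
          simp only [fillGapsStepA]
          rw [if_neg (by simpa using fun h => hxw h.symm)]
        have hB : fillGapsStepB out ((i, some x), (b.1, some w)) = out := by
          simp [fillGapsStepB, hxw]
        rw [hA, hB, ih hrest]

-- ===== VERDICT (by name: the statement is the Claim_ definition above) =====
theorem fill_gaps_spec : Claim_equal_fill_gaps := by
  intro ts _
  show fill_gaps ts = fill_gaps_alt ts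
  unfold fill_gaps fill_gaps_alt
  rw [foldl_stepA_filter]
  set anchors := (PySem.List.enumerate ts 0).filter (fun p => p.2.isSome) with hanch
  have hall : ∀ p ∈ anchors, p.2.isSome := by
    intro p hp
    rw [hanch] at hp
    exact (List.mem_filter.mp hp).2
  cases hA : anchors with
  | nil => rfl
  | cons a rest =>
      obtain ⟨x, hx⟩ := Option.isSome_iff_exists.mp (hall a (by simp [hA]))
      have hrest : ∀ p ∈ rest, p.2.isSome := fun p hp => hall p (by simp [hA, hp])
      have ha : a = (a.1, some x) := by rw [← hx]
      simp only [List.foldl_cons, List.tail_cons]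
      have hstep : fillGapsStepA (ts, none, 0) a = (ts, some x, a.1 + 1) := by
        rw [ha]; simp [fillGapsStepA]
      rw [hstep]
      have := foldl_stepA_eq_stepB rest hrest ts a.1 x
      rw [this, ← ha]
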